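-- pv_equiv track=rewrite | github.com/cdmismatch/cdmismatch | code/ana_compare_res_v2.py | get_mm_part_of_trace_per_bgp
-- ===== SOURCE A (Python) =====
-- def get_mm_part_of_trace_per_bgp(trace_list, bgp_list):
--     rec_index = 0
--     for i in range(len(trace_list)):
--         hop = trace_list[i]
--         if hop != '*' and hop != '?' and not hop.startswith('<'):
--             if hop in bgp_list:
--                 rec_index = i
--             else:
--                 return ' '.join(trace_list[rec_index:])
--     return None
-- ===== SOURCE B (Python) =====
-- def get_mm_part_of_trace_per_bgp(trace_list, bgp_list):
--     def valid(hop):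
--         return hop != '*' and hop != '?' and not hop.startswith('<')
--     bgp = set(bgp_list)
--     mm = next((i for i, hop in enumerate(trace_list)
--                if valid(hop) and hop not in bgp), None)
--     if mm is None:
--         return None
--     rec = next((i for i in reversed(range(mm))
--                 if valid(trace_list[i]) and trace_list[i] in bgp), 0)
--     return ' '.join(trace_list[rec:])
-- ===== Notes on version B (the rewrite author's own statement) =====
-- stated objective: alternative
-- what changed: Replaces A's single forward loop carrying a rec_index accumulator by two separate scans: a first-mismatch search (with a set for BGP membership) followed by a back-to-front search over the prefix for the last covered hop, defaulting to 0.
import Mathlib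
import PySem

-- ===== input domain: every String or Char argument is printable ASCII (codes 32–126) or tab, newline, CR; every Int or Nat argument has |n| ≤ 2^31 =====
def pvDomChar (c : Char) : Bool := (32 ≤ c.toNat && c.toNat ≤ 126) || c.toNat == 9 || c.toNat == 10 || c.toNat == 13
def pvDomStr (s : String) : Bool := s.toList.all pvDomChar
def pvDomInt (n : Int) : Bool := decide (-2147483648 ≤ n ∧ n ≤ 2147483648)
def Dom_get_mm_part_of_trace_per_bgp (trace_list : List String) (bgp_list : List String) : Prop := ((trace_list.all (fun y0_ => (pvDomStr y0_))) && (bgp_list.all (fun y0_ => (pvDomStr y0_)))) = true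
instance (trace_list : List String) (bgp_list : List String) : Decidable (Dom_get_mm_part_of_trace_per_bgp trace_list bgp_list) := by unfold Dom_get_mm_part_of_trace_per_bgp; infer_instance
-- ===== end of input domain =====

-- B replaces A's one forward loop with an accumulator by two independent scans
-- (first mismatch, then last covered hop before it, backwards): objective 'alternative'.

-- ===== PORT A =====
-- the validity test both Pythons apply to a hop (inline in A, a local def in B):
-- hop != '*' and hop != '?' and not hop.startswith('<')
def pv_valid (hop : String) : Bool :=
  (hop != "*") && (hop != "?") && !(PySem.Str.startswith hop "<")

-- A's for-loop over range(len(trace_list)) with state (i, rec_index);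
-- trace_list[rec_index:] with 0 ≤ rec_index ≤ len is exactly List.drop.
def pvA_go (trace_list : List String) (bgp_list : List String) :
    List String → Nat → Nat → Option String
  | [], _, _ => none
  | hop :: rest, i, rec_ =>
    if pv_valid hop then
      if hop ∈ bgp_list then pvA_go trace_list bgp_list rest (i + 1) i
      else some (PySem.Str.join " " (trace_list.drop rec_))
    else pvA_go trace_list bgp_list rest (i + 1) rec_

def get_mm_part_of_trace_per_bgp (trace_list : List String) (bgp_list : List String) : Option String :=
  pvA_go trace_list bgp_list trace_list 0 0

-- ===== PORT B =====
-- first i with valid(hop) and hop not in the bgp set (enumerate + next, None if absent)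
def pvB_mm? (bgp : PySem.Set String) : List String → Nat → Option Nat
  | [], _ => none
  | hop :: rest, i =>
    if pv_valid hop && !(PySem.Set.contains bgp hop) then some i
    else pvB_mm? bgp rest (i + 1)

def get_mm_part_of_trace_per_bgp_alt (trace_list : List String) (bgp_list : List String) : Option String :=
  let bgp := PySem.Set.ofList bgp_list
  match pvB_mm? bgp trace_list 0 with
  | none => none
  | some mm =>
    -- next over reversed(range(mm)) with default 0; trace_list[i] has 0 ≤ i < len here
    let rec_ := (((List.range mm).reverse).find? (fun i =>
        pv_valid (trace_list.getD i "") && PySem.Set.contains bgp (trace_list.getD i ""))).getD 0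
    some (PySem.Str.join " " (trace_list.drop rec_))

-- ===== PRECONDITION & SPEC =====
def Spec_get_mm_part_of_trace_per_bgp (trace_list : List String) (bgp_list : List String) (out : Option String) : Prop := out = get_mm_part_of_trace_per_bgp_alt trace_list bgp_list
instance (trace_list : List String) (bgp_list : List String) (out : Option String) : Decidable (Spec_get_mm_part_of_trace_per_bgp trace_list bgp_list out) := by unfold Spec_get_mm_part_of_trace_per_bgp; infer_instance

-- ===== CLAIM (what is proved, stated in full; the proofs are below) =====
def Claim_equal_get_mm_part_of_trace_per_bgp : Prop := ∀ (trace_list : List String) (bgp_list : List String), Dom_get_mm_part_of_trace_per_bgp trace_list bgp_list → Spec_get_mm_part_of_trace_per_bgp trace_list bgp_list (get_mm_part_of_trace_per_bgp trace_list bgp_list)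

-- ===== LEMMAS AND PROOFS =====

theorem pvB_mm?_ge (bgp : PySem.Set String) :
    ∀ (l : List String) (i mm : Nat), pvB_mm? bgp l i = some mm → i ≤ mm := by
  intro l
  induction l with
  | nil => intro i mm h; simp [pvB_mm?] at h
  | cons hop rest ih =>
    intro i mm h
    unfold pvB_mm? at h
    split at h
    · simp only [Option.some.injEq] at h; omega
    · have := ih (i + 1) mm h; omega

theorem pv_key (trace_list bgp_list : List String) :
    ∀ (l : List String) (i rec_ : Nat), l = trace_list.drop i →
    pvA_go trace_list bgp_list l i rec_ =
      match pvB_mm? (PySem.Set.ofList bgp_list) l i with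
      | none => none
      | some mm => some (PySem.Str.join " " (trace_list.drop
          ((((List.range' i (mm - i)).reverse).find? (fun j =>
            pv_valid (trace_list.getD j "") &&
            PySem.Set.contains (PySem.Set.ofList bgp_list) (trace_list.getD j ""))).getD rec_))) := by
  intro l
  induction l with
  | nil => intro i rec_ _; simp [pvA_go, pvB_mm?]
  | cons hop rest ih =>
    intro i rec_ hl
    have hopt : trace_list[i]? = some hop := by
      have h0 : (trace_list.drop i)[0]? = trace_list[i + 0]? := List.getElem?_drop
      rw [← hl] at h0; simpa using h0.symm
    have hget : trace_list.getD i "" = hop := by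
      simp [List.getD_eq_getElem?_getD, hopt]
    have hdrop : rest = trace_list.drop (i + 1) := by
      have : (trace_list.drop i).tail = trace_list.drop (i + 1) := by
        rw [List.tail_drop]
      rw [← hl] at this; simpa using this
    by_cases hv : pv_valid hop = true
    · have hcont : PySem.Set.contains (PySem.Set.ofList bgp_list) hop = decide (hop ∈ bgp_list) := by
        by_cases hm : hop ∈ bgp_list
        · simp [hm, PySem.Set.mem_ofList]
        · simp [hm, PySem.Set.mem_ofList]
      by_cases hm : hop ∈ bgp_list
      · -- covered hop: A records i, B's first pass skips it
        have hA : pvA_go trace_list bgp_list (hop :: rest) i rec_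
            = pvA_go trace_list bgp_list rest (i + 1) i := by
          simp [pvA_go, hv, hm]
        have hB : pvB_mm? (PySem.Set.ofList bgp_list) (hop :: rest) i
            = pvB_mm? (PySem.Set.ofList bgp_list) rest (i + 1) := by
          simp [pvB_mm?, hv, hcont, hm]
        rw [hA, hB, ih (i + 1) i hdrop]
        cases hmm : pvB_mm? (PySem.Set.ofList bgp_list) rest (i + 1) with
        | none => simp
        | some mm =>
          have hge : i + 1 ≤ mm := pvB_mm?_ge _ _ _ _ hmm
          have hn : mm - i = (mm - (i + 1)) + 1 := by omega
          simp only [hn, List.range'_succ, List.reverse_cons, List.find?_append]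
          have h1 : List.find? (fun j => pv_valid (trace_list.getD j "") &&
              PySem.Set.contains (PySem.Set.ofList bgp_list) (trace_list.getD j "")) [i]
              = some i := by
            simp [List.find?, List.getD_eq_getElem?_getD, hopt, hv, hcont, hm]
          rw [h1]
          cases hfr : List.find? (fun j => pv_valid (trace_list.getD j "") &&
              PySem.Set.contains (PySem.Set.ofList bgp_list) (trace_list.getD j ""))
              ((List.range' (i + 1) (mm - (i + 1))).reverse) <;> simp [hfr, Option.or]
      · -- mismatch hop: A returns here, B's first pass stops at i
        have hA : pvA_go trace_list bgp_list (hop :: rest) i rec_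
            = some (PySem.Str.join " " (trace_list.drop rec_)) := by
          simp [pvA_go, hv, hm]
        have hB : pvB_mm? (PySem.Set.ofList bgp_list) (hop :: rest) i = some i := by
          simp [pvB_mm?, hv, hcont, hm]
        rw [hA, hB]
        simp
    · -- invalid hop: both skip it
      have hA : pvA_go trace_list bgp_list (hop :: rest) i rec_
          = pvA_go trace_list bgp_list rest (i + 1) rec_ := by
        simp [pvA_go, hv]
      have hB : pvB_mm? (PySem.Set.ofList bgp_list) (hop :: rest) i
          = pvB_mm? (PySem.Set.ofList bgp_list) rest (i + 1) := by
        simp [pvB_mm?, hv]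
      rw [hA, hB, ih (i + 1) rec_ hdrop]
      cases hmm : pvB_mm? (PySem.Set.ofList bgp_list) rest (i + 1) with
      | none => simp
      | some mm =>
        have hge : i + 1 ≤ mm := pvB_mm?_ge _ _ _ _ hmm
        have hn : mm - i = (mm - (i + 1)) + 1 := by omega
        simp only [hn, List.range'_succ, List.reverse_cons, List.find?_append]
        have h1 : List.find? (fun j => pv_valid (trace_list.getD j "") &&
            PySem.Set.contains (PySem.Set.ofList bgp_list) (trace_list.getD j "")) [i]
            = none := by
          simp [List.find?, List.getD_eq_getElem?_getD, hopt, hv]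
        rw [h1]
        cases hfr : List.find? (fun j => pv_valid (trace_list.getD j "") &&
            PySem.Set.contains (PySem.Set.ofList bgp_list) (trace_list.getD j ""))
            ((List.range' (i + 1) (mm - (i + 1))).reverse) <;> simp [hfr, Option.or]

theorem get_mm_part_of_trace_per_bgp_spec : Claim_equal_get_mm_part_of_trace_per_bgp := by
  intro trace_list bgp_list _
  unfold Spec_get_mm_part_of_trace_per_bgp get_mm_part_of_trace_per_bgp
    get_mm_part_of_trace_per_bgp_alt
  rw [pv_key trace_list bgp_list trace_list 0 0 (by simp)]
  cases hmm : pvB_mm? (PySem.Set.ofList bgp_list) trace_list 0 with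
  | none => simp [hmm]
  | some mm => simp [hmm, List.range_eq_range']
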